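-- pv_equiv track=rewrite | github.com/l-gallucci/MetalGenie-Evo | MetalGenie-Evo.py | cluster_by_index
-- ===== SOURCE A (Python) =====
-- from collections import defaultdict
--
-- def _index_from_name(orf_name):
--     parts = orf_name.rsplit("_", 1)
--     if len(parts) == 2:
--         try:
--             return parts[0], int(parts[1])
--         except ValueError:
--             pass
--     return orf_name, 0
--
-- def cluster_by_index(orf_set, max_gap=5):
--     by_contig = defaultdict(list)
--     for orf in orf_set:
--         contig, idx = _index_from_name(orf)
--         by_contig[contig].append((idx, orf))
--     clusters = []
--     for contig, entries in by_contig.items():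
--         entries.sort(key=lambda x: x[0])
--         group = [entries[0][1]]
--         for i in range(1, len(entries)):
--             if entries[i][0] - entries[i-1][0] <= max_gap:
--                 group.append(entries[i][1])
--             else:
--                 clusters.append(group)
--                 group = [entries[i][1]]
--         clusters.append(group)
--     return clusters
-- ===== SOURCE B (Python) =====
-- def _index_from_name(orf_name):
--     parts = orf_name.rsplit("_", 1)
--     if len(parts) == 2:
--         try:
--             return parts[0], int(parts[1])
--         except ValueError:
--             pass
--     return orf_name, 0
--
-- def cluster_by_index(orf_set, max_gap=5):
--     # One flat pass: record each contig's first-appearance rank, tag every orf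
--     # with (rank, idx), stable-sort the flat list once, then one linear scan
--     # that opens a new cluster when the rank changes or the idx gap is too big.
--     rank = {}
--     flat = []
--     for orf in orf_set:
--         contig, idx = _index_from_name(orf)
--         r = rank.setdefault(contig, len(rank))
--         flat.append((r, idx, orf))
--     flat = sorted(flat, key=lambda t: (t[0], t[1]))
--     clusters = []
--     cur = []
--     prev_r = prev_i = 0
--     for r, i, orf in flat:
--         if cur and r == prev_r and i - prev_i <= max_gap:
--             cur.append(orf)
--         else:
--             if cur:
--                 clusters.append(cur)
--             cur = [orf]
--         prev_r, prev_i = r, i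
--     if cur:
--         clusters.append(cur)
--     return clusters
-- ===== Notes on version B (the rewrite author's own statement) =====
-- stated objective: alternative
-- what changed: B replaces A's dict-of-buckets pipeline (group entries per contig, sort each bucket, scan each bucket) by tagging every orf with its contig's first-appearance rank in one pass, stable-sorting the single flat list by (rank, idx) once, and emitting all clusters in one boundary-detecting linear scan.
import Mathlib
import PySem

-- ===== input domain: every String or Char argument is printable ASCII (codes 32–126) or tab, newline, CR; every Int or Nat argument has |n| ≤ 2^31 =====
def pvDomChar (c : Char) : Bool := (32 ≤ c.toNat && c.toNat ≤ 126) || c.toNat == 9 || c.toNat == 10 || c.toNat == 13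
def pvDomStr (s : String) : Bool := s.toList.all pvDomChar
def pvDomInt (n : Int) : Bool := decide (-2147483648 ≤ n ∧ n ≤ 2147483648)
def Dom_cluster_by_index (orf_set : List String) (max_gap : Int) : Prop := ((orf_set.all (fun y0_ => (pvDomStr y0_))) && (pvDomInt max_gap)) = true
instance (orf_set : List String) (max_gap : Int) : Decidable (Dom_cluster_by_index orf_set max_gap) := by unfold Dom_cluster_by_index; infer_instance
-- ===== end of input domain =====

-- B replaces A's dict-of-buckets (sort each bucket, scan each bucket) by one flat
-- stable sort over (contig-rank, idx) followed by a single boundary-detecting scan;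
-- alternative decomposition, same result (return value only; neither mutates input).

-- ===== PORT A =====
-- _index_from_name: s.rsplit("_", 1) is hand-ported via the HIGHEST '_' index
-- (PySem.Str.rfind, -1 = absent); exact on all strings.  int(parts[1]) is
-- PySem.Int.ofChars? (none = ValueError).  Shared by both ports (same helper in Source B).
def indexFromName (orf_name : String) : String × Int :=
  let k := PySem.Str.rfind orf_name "_"
  if k = -1 then (orf_name, 0)
  else
    match PySem.Int.ofChars? (orf_name.toList.drop (k.toNat + 1)) with
    | some n => (String.ofList (orf_name.toList.take k.toNat), n)
    | none => (orf_name, 0)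

-- the inner 'for i in range(1, len(entries))' loop, walking the sorted bucket with
-- the previous entry's index at hand (entries[i-1][0] = prev)
def clusterScanA (max_gap : Int) (clusters : List (List String)) (group : List String)
    (prev : Int) : List (Int × String) → List (List String)
  | [] => clusters ++ [group]
  | (i, o) :: rest =>
    if i - prev ≤ max_gap then clusterScanA max_gap clusters (group ++ [o]) i rest
    else clusterScanA max_gap (clusters ++ [group]) [o] i rest

def cluster_by_index (orf_set : List String) (max_gap : Int) : List (List String) :=
  let by_contig : PySem.Dict String (List (Int × String)) :=
    orf_set.foldl (fun d orf =>
      let p := indexFromName orf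
      d.modify p.1 [] (· ++ [(p.2, orf)])) PySem.Dict.empty
  by_contig.items.foldl (fun clusters ce =>
    match PySem.List.sorted ce.2 (fun x => x.1) false with
    | [] => clusters ++ [[]]   -- unreachable: every dict bucket is nonempty
    | e0 :: rest => clusterScanA max_gap clusters [e0.2] e0.1 rest) []

-- ===== PORT B =====
-- the single scan over the sorted flat list: cur/prev_r/prev_i state of Source B;
-- the first element always opens a cluster (cur empty only before it)
def scanBGo (max_gap : Int) (clusters : List (List String)) (cur : List String)
    (pr pi : Int) : List (Int × Int × String) → List (List String)
  | [] => clusters ++ [cur]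
  | (r, i, o) :: rest =>
    if r = pr ∧ i - pi ≤ max_gap then scanBGo max_gap clusters (cur ++ [o]) r i rest
    else scanBGo max_gap (clusters ++ [cur]) [o] r i rest

def scanB (max_gap : Int) : List (Int × Int × String) → List (List String)
  | [] => []
  | (r, i, o) :: rest => scanBGo max_gap [] [o] r i rest

def cluster_by_index_alt (orf_set : List String) (max_gap : Int) : List (List String) :=
  let st : PySem.Dict String Int × List (Int × Int × String) :=
    orf_set.foldl (fun st orf =>
      let p := indexFromName orf
      let r := st.1.getD p.1 (st.1.size : Int)        -- rank.setdefault(contig, len(rank))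
      (st.1.setdefault p.1 (st.1.size : Int), st.2 ++ [(r, p.2, orf)]))
      (PySem.Dict.empty, [])
  scanB max_gap (PySem.List.sorted2 st.2 (fun t => t.1) (fun t => t.2.1) false)

-- ===== PRECONDITION & SPEC =====
def Spec_cluster_by_index (orf_set : List String) (max_gap : Int) (out : List (List String)) : Prop := out = cluster_by_index_alt orf_set max_gap
instance (orf_set : List String) (max_gap : Int) (out : List (List String)) : Decidable (Spec_cluster_by_index orf_set max_gap out) := by unfold Spec_cluster_by_index; infer_instance

-- ===== CLAIM (what is proved, stated in full; the proofs are below) =====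
def Claim_equal_cluster_by_index : Prop := ∀ (orf_set : List String) (max_gap : Int), Dom_cluster_by_index orf_set max_gap → Spec_cluster_by_index orf_set max_gap (cluster_by_index orf_set max_gap)

-- ===== LEMMAS AND PROOFS =====

-- proof-side abbreviations
def pKey (o : String) : String := (indexFromName o).1
def pIdx (o : String) : Int := (indexFromName o).2
def ctgs (L : List String) : List String := PySem.List.dedup (L.map pKey)
def bkt (L : List String) (c : String) : List (Int × String) :=
  (L.filter (fun o => pKey o == c)).map (fun o => (pIdx o, o))
def rnk (L : List String) (c : String) : Int := ((ctgs L).idxOf c : Int)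
def trip (L : List String) (o : String) : Int × Int × String := (rnk L (pKey o), pIdx o, o)
def scanBkt (mg : Int) (es : List (Int × String)) : List (List String) :=
  match PySem.List.sorted es (fun x => x.1) false with
  | [] => [[]]
  | e0 :: r => clusterScanA mg [] [e0.2] e0.1 r
def rankItems (D : List String) : List (String × Int) :=
  D.zipIdx.map (fun p => (p.1, (p.2 : Int)))
def cmp2 (a b : Int × Int × String) : Bool :=
  decide (a.1 < b.1) || (!decide (b.1 < a.1) && decide (a.2.1 < b.2.1))

-- insertBy toolbox
theorem insertBy_cons {α : Type} (before : α → α → Bool) (x y : α) (ys : List α) :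
    PySem.List.insertBy before x (y :: ys) =
      if before x y then x :: y :: ys else y :: PySem.List.insertBy before x ys := rfl

theorem insertBy_front {α : Type} (before : α → α → Bool) (x : α) (l : List α)
    (h : ∀ z ∈ l, before x z = true) : PySem.List.insertBy before x l = x :: l := by
  cases l with
  | nil => rfl
  | cons y ys => rw [insertBy_cons, if_pos (h y (by simp))]

theorem insertBy_append_left {α : Type} (before : α → α → Bool) (x : α) (l1 l2 : List α)
    (h : ∀ y ∈ l1, before x y = false) :
    PySem.List.insertBy before x (l1 ++ l2) = l1 ++ PySem.List.insertBy before x l2 := by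
  induction l1 with
  | nil => rfl
  | cons y t ih =>
    rw [List.cons_append, insertBy_cons, if_neg (by simp [h y (by simp)]), List.cons_append,
      ih (fun y hy => h y (by simp [hy]))]

theorem insertBy_append_right {α : Type} (before : α → α → Bool) (x : α) (l1 l2 : List α)
    (h : ∀ z ∈ l2, before x z = true) :
    PySem.List.insertBy before x (l1 ++ l2) = PySem.List.insertBy before x l1 ++ l2 := by
  induction l1 with
  | nil => rw [List.nil_append, insertBy_front before x l2 h]; rfl
  | cons y t ih =>
    rw [List.cons_append, insertBy_cons, insertBy_cons]
    by_cases hb : before x y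
    · simp [hb]
    · rw [if_neg hb, if_neg hb, ih, List.cons_append]

theorem insertBy_congr {α : Type} (before before' : α → α → Bool) (x : α) (l : List α)
    (h : ∀ y ∈ l, before x y = before' x y) :
    PySem.List.insertBy before x l = PySem.List.insertBy before' x l := by
  induction l with
  | nil => rfl
  | cons y t ih =>
    rw [insertBy_cons, insertBy_cons, h y (by simp), ih (fun y hy => h y (by simp [hy]))]

theorem insertBy_map {α β : Type} (before : α → α → Bool) (before' : β → β → Bool)
    (f : α → β) (x : α) (l : List α) (h : ∀ a, before' (f x) (f a) = before x a) :
    PySem.List.insertBy before' (f x) (l.map f) = (PySem.List.insertBy before x l).map f := by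
  induction l with
  | nil => rfl
  | cons y t ih =>
    rw [List.map_cons, insertBy_cons, insertBy_cons, h y]
    by_cases hb : before x y
    · simp [hb]
    · rw [if_neg hb, if_neg hb, List.map_cons, ih]

-- sorted / sorted2 as right folds
theorem sorted_append_singleton {α κ : Type} [LinearOrder κ] (xs : List α) (x : α) (key : α → κ) :
    PySem.List.sorted (xs ++ [x]) key false =
      PySem.List.insertBy (fun a b => decide (key a < key b)) x (PySem.List.sorted xs key false) := by
  rw [PySem.List.sorted_eq_foldl_insertBy, PySem.List.sorted_eq_foldl_insertBy, List.foldl_append]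
  rfl

theorem sorted2_eq_foldl (xs : List (Int × Int × String)) :
    PySem.List.sorted2 xs (fun t => t.1) (fun t => t.2.1) false =
      xs.foldl (fun acc x => PySem.List.insertBy cmp2 x acc) [] := rfl

theorem sorted2_append_singleton (xs : List (Int × Int × String)) (x : Int × Int × String) :
    PySem.List.sorted2 (xs ++ [x]) (fun t => t.1) (fun t => t.2.1) false =
      PySem.List.insertBy cmp2 x (PySem.List.sorted2 xs (fun t => t.1) (fun t => t.2.1) false) := by
  rw [sorted2_eq_foldl, sorted2_eq_foldl, List.foldl_append]
  rfl

theorem sorted_map {α β κ : Type} [LinearOrder κ] (l : List α) (f : α → β) (key : β → κ) :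
    PySem.List.sorted (l.map f) key false =
      (PySem.List.sorted l (fun a => key (f a)) false).map f := by
  induction l using List.reverseRecOn with
  | nil => rfl
  | append_singleton t x ih =>
    rw [List.map_append, List.map_singleton, sorted_append_singleton, sorted_append_singleton,
      ih, insertBy_map (before := fun a b => decide (key (f a) < key (f b))) (f := f)
        (h := fun a => rfl)]

-- a stable sort on a (rank, idx) pair key, rank values listed increasingly in ks,
-- is the concatenation over ks of the idx-sorts of the rank-classes
theorem flatMap_congr_mem {α β : Type} (l : List α) (f g : α → List β)
    (h : ∀ a ∈ l, f a = g a) : l.flatMap f = l.flatMap g := by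
  induction l with
  | nil => rfl
  | cons a t ih =>
    rw [List.flatMap_cons, List.flatMap_cons, h a (by simp), ih (fun a ha => h a (by simp [ha]))]

theorem sorted2_flatMap (xs : List (Int × Int × String)) (ks : List Int)
    (hks : ks.Pairwise (· < ·)) (hcov : ∀ x ∈ xs, x.1 ∈ ks) :
    PySem.List.sorted2 xs (fun t => t.1) (fun t => t.2.1) false =
      ks.flatMap (fun k =>
        PySem.List.sorted (xs.filter (fun x => x.1 == k)) (fun x => x.2.1) false) := by
  induction xs using List.reverseRecOn with
  | nil =>
    rw [show PySem.List.sorted2 ([] : List (Int × Int × String)) (fun t => t.1) (fun t => t.2.1)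
        false = [] from rfl,
      flatMap_congr_mem ks _ (fun _ => []) (fun k _ => by rw [List.filter_nil]; rfl)]
    simp
  | append_singleton xs x ih =>
    have hcov' : ∀ y ∈ xs, y.1 ∈ ks := fun y hy => hcov y (by simp [hy])
    have hk0 : x.1 ∈ ks := hcov x (by simp)
    obtain ⟨p, s, hps⟩ := List.append_of_mem hk0
    subst hps
    obtain ⟨hp, hq, hpq⟩ := List.pairwise_append.1 hks
    have hslt : ∀ b ∈ s, x.1 < b := (List.pairwise_cons.1 hq).1
    have hplt : ∀ a ∈ p, a < x.1 := fun a ha => hpq a ha x.1 (by simp)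
    have hmemF : ∀ (k : Int) (y : Int × Int × String),
        y ∈ PySem.List.sorted (xs.filter (fun z => z.1 == k)) (fun z => z.2.1) false →
        y.1 = k := by
      intro k y hy
      have h1 := (PySem.List.mem_sorted _ _ _ _).1 hy
      have h2 := List.mem_filter.1 h1
      simpa using h2.2
    rw [sorted2_append_singleton, ih hcov', List.flatMap_append, List.flatMap_cons,
      insertBy_append_left cmp2 x _ _ (by
        intro y hy
        obtain ⟨k, hk, hyk⟩ := List.mem_flatMap.1 hy
        have h2 : y.1 < x.1 := (hmemF k y hyk) ▸ hplt k hk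
        simp [cmp2, h2, h2.asymm]),
      insertBy_append_right cmp2 x _ _ (by
        intro z hz
        obtain ⟨k, hk, hzk⟩ := List.mem_flatMap.1 hz
        have h2 : x.1 < z.1 := (hmemF k z hzk) ▸ hslt k hk
        simp [cmp2, h2]),
      insertBy_congr cmp2 (fun a b => decide (a.2.1 < b.2.1)) x _ (by
        intro y hy
        have h1 : y.1 = x.1 := hmemF x.1 y hy
        simp [cmp2, h1]),
      List.flatMap_append, List.flatMap_cons]
    congr 1
    · exact flatMap_congr_mem p _ _ (fun k hk => by
        rw [List.filter_append,
          show [x].filter (fun z => z.1 == k) = [] from by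
            simp [(ne_of_lt (hplt k hk)).symm],
          List.append_nil])
    congr 1
    · rw [List.filter_append,
        show [x].filter (fun z => z.1 == x.1) = [x] from by simp,
        sorted_append_singleton]
    · exact (flatMap_congr_mem s _ _ (fun k hk => by
        rw [List.filter_append,
          show [x].filter (fun z => z.1 == k) = [] from by
            simp [(ne_of_gt (hslt k hk)).symm],
          List.append_nil])).symm

-- scan toolbox
theorem scanA_acc (mg : Int) (cl : List (List String)) (g : List String) (p : Int)
    (l : List (Int × String)) :
    clusterScanA mg cl g p l = cl ++ clusterScanA mg [] g p l := by
  induction l generalizing cl g p with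
  | nil => rfl
  | cons e t ih =>
    obtain ⟨i, o⟩ := e
    by_cases h : i - p ≤ mg
    · rw [clusterScanA, if_pos h, clusterScanA, if_pos h, ih]
    · rw [clusterScanA, if_neg h, clusterScanA, if_neg h, ih, ih (cl := [] ++ [g]),
        List.nil_append, List.append_assoc]

theorem scanBGo_acc (mg : Int) (cl : List (List String)) (cur : List String) (pr pi : Int)
    (l : List (Int × Int × String)) :
    scanBGo mg cl cur pr pi l = cl ++ scanBGo mg [] cur pr pi l := by
  induction l generalizing cl cur pr pi with
  | nil => rfl
  | cons e t ih =>
    obtain ⟨r, i, o⟩ := e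
    by_cases h : r = pr ∧ i - pi ≤ mg
    · rw [scanBGo, if_pos h, scanBGo, if_pos h, ih]
    · rw [scanBGo, if_neg h, scanBGo, if_neg h, ih, ih (cl := [] ++ [cur]),
        List.nil_append, List.append_assoc]

theorem scanBGo_map_seg (mg : Int) (cl : List (List String)) (cur : List String) (r pi : Int)
    (es : List (Int × String)) :
    scanBGo mg cl cur r pi (es.map (fun e => (r, e.1, e.2))) = clusterScanA mg cl cur pi es := by
  induction es generalizing cl cur pi with
  | nil => rfl
  | cons e t ih =>
    obtain ⟨i, o⟩ := e
    rw [List.map_cons, scanBGo, clusterScanA]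
    by_cases h : i - pi ≤ mg
    · rw [if_pos ⟨rfl, h⟩, if_pos h, ih]
    · rw [if_neg (by simp [h]), if_neg h, ih]

theorem scanBGo_append (mg : Int) (r : Int) (l1 : List (Int × Int × String))
    (e2 : Int × Int × String) (l2 : List (Int × Int × String))
    (h1 : ∀ e ∈ l1, e.1 = r) (h2 : e2.1 ≠ r) (cur : List String) (pi : Int) :
    scanBGo mg [] cur r pi (l1 ++ e2 :: l2) =
      scanBGo mg [] cur r pi l1 ++ scanB mg (e2 :: l2) := by
  induction l1 generalizing cur pi with
  | nil =>
    obtain ⟨r2, i2, o2⟩ := e2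
    have hL : scanBGo mg [] cur r pi ([] ++ (r2, i2, o2) :: l2) =
        scanBGo mg ([] ++ [cur]) [o2] r2 i2 l2 := by
      rw [List.nil_append, scanBGo, if_neg (by simp only [ne_eq] at h2; simp [h2])]
    rw [hL, List.nil_append, scanBGo_acc]
    rfl
  | cons e t ih =>
    obtain ⟨r1, i, o⟩ := e
    have hr1 : r1 = r := h1 (r1, i, o) (by simp)
    subst hr1
    rw [List.cons_append, scanBGo, scanBGo]
    by_cases h : r1 = r1 ∧ i - pi ≤ mg
    · rw [if_pos h, if_pos h, ih (fun e he => h1 e (by simp [he]))]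
    · rw [if_neg h, if_neg h, scanBGo_acc, ih (fun e he => h1 e (by simp [he])),
        scanBGo_acc mg ([] ++ [cur]), List.nil_append, List.append_assoc]

theorem scanB_flatMap (mg : Int) (js : List Int) (G : Int → List (Int × Int × String))
    (hne : ∀ j ∈ js, G j ≠ []) (hr : ∀ j ∈ js, ∀ e ∈ G j, e.1 = j)
    (hch : js.Pairwise (· ≠ ·)) :
    scanB mg (js.flatMap G) = js.flatMap (fun j => scanB mg (G j)) := by
  induction js with
  | nil => rfl
  | cons j js' ih =>
    cases js' with
    | nil => simp
    | cons j2 rest =>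
      obtain ⟨g0, gt, hG⟩ : ∃ g0 gt, G j = g0 :: gt := by
        cases hG : G j with
        | nil => exact absurd hG (hne j (by simp))
        | cons a b => exact ⟨a, b, rfl⟩
      obtain ⟨h0, ht, hG2⟩ : ∃ h0 ht, G j2 = h0 :: ht := by
        cases hG2 : G j2 with
        | nil => exact absurd hG2 (hne j2 (by simp))
        | cons a b => exact ⟨a, b, rfl⟩
      have hstep : (j2 :: rest).flatMap G = h0 :: (ht ++ rest.flatMap G) := by
        rw [List.flatMap_cons, hG2]; rfl
      obtain ⟨r0, i0, o0⟩ := g0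
      have hr0 : r0 = j := hr j (by simp) (r0, i0, o0) (by rw [hG]; simp)
      subst hr0
      rw [List.flatMap_cons, hG, List.cons_append, scanB, hstep,
        scanBGo_append mg r0 gt h0 (ht ++ rest.flatMap G)
          (by intro e he
              exact hr r0 (by simp) e (by rw [hG]; simp [he]))
          (by have : h0.1 = j2 := hr j2 (by simp) h0 (by rw [hG2]; simp)
              rw [this]
              exact fun hh => (List.pairwise_cons.1 hch).1 j2 (by simp) hh.symm),
        ← hstep, ih (fun j hj => hne j (by simp [hj]))
          (fun j hj => hr j (by simp [hj])) (List.pairwise_cons.1 hch).2,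
        List.flatMap_cons (x := r0), hG, scanB]

theorem scanB_seg (mg : Int) (r : Int) (e0 : Int × String) (rest : List (Int × String)) :
    scanB mg ((e0 :: rest).map (fun e => (r, e.1, e.2))) =
      clusterScanA mg [] [e0.2] e0.1 rest := by
  obtain ⟨i0, o0⟩ := e0
  rw [List.map_cons, scanB, scanBGo_map_seg]

-- A in normal form
theorem A_norm (L : List String) (mg : Int) :
    cluster_by_index L mg = (ctgs L).flatMap (fun c => scanBkt mg (bkt L c)) := by
  have hshape : cluster_by_index L mg =
      ((L.map (fun o => (pKey o, (pIdx o, o)))).foldl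
        (fun d p => d.modify p.1 [] (· ++ [p.2])) PySem.Dict.empty).items.foldl
        (fun clusters ce =>
          match PySem.List.sorted ce.2 (fun x => x.1) false with
          | [] => clusters ++ [[]]
          | e0 :: rest => clusterScanA mg clusters [e0.2] e0.1 rest) [] := by
    rw [List.foldl_map]
    rfl
  have hkeys : ((L.map (fun o => (pKey o, (pIdx o, o)))).foldl
      (fun d p => d.modify p.1 [] (· ++ [p.2])) PySem.Dict.empty).keys = ctgs L := by
    rw [PySem.Dict.keys_foldl_modify_key (L.map (fun o => (pKey o, (pIdx o, o))))
      (fun p => p.1) [] (fun _ p => fun v => v ++ [p.2]) PySem.Dict.empty]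
    rw [List.map_map]
    rfl
  have hnd : ((L.map (fun o => (pKey o, (pIdx o, o)))).foldl
      (fun d p => d.modify p.1 [] (· ++ [p.2])) PySem.Dict.empty).keys.Nodup := by
    rw [hkeys]
    exact PySem.Set.nodup_ofList _
  have hgetD : ∀ c, ((L.map (fun o => (pKey o, (pIdx o, o)))).foldl
      (fun d p => d.modify p.1 [] (· ++ [p.2])) PySem.Dict.empty).getD c [] = bkt L c := by
    intro c
    rw [PySem.Dict.getD_foldl_modify_append, List.filter_map, List.map_map]
    rfl
  have hitems : ((L.map (fun o => (pKey o, (pIdx o, o)))).foldl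
      (fun d p => d.modify p.1 [] (· ++ [p.2])) PySem.Dict.empty).items =
      (ctgs L).map (fun c => (c, bkt L c)) := by
    rw [PySem.Dict.items_eq_map_keys _ hnd [], hkeys]
    exact List.map_congr_left (fun c _ => by rw [hgetD])
  have hb : (fun (clusters : List (List String)) (ce : String × List (Int × String)) =>
      match PySem.List.sorted ce.2 (fun x => x.1) false with
      | [] => clusters ++ [[]]
      | e0 :: rest => clusterScanA mg clusters [e0.2] e0.1 rest) =
      (fun clusters ce => clusters ++ scanBkt mg ce.2) := by
    funext clusters ce
    cases h : PySem.List.sorted ce.2 (fun x => x.1) false with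
    | nil => simp [scanBkt, h]
    | cons e0 r => simp only [scanBkt, h]; rw [scanA_acc]
  rw [hshape, hb, PySem.List.foldl_append_eq_flatMap, List.nil_append, hitems,
    List.flatMap_map]

-- the rank dictionary B builds, characterised
theorem find?_rankItems (D : List String) (c : String) (n : Nat) :
    List.find? (fun p => p.1 == c) ((D.zipIdx n).map (fun p => (p.1, (p.2 : Int)))) =
      (if c ∈ D then some (c, ((n + D.idxOf c : Nat) : Int)) else none) := by
  induction D generalizing n with
  | nil => rfl
  | cons a D' ih =>
    rw [List.zipIdx_cons, List.map_cons]
    by_cases hac : a = c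
    · subst hac
      rw [List.find?_cons_of_pos (by simp), if_pos (List.mem_cons_self), List.idxOf_cons_self]
      simp
    · rw [List.find?_cons_of_neg (by simp [hac]), ih (n + 1)]
      by_cases hc : c ∈ D'
      · rw [if_pos hc, if_pos (by simp [hc]), List.idxOf_cons_ne _ hac]
        congr 2
        omega
      · rw [if_neg hc, if_neg (fun h => by
          rcases List.mem_cons.1 h with h | h
          · exact hac h.symm
          · exact hc h)]

theorem mem_ctgs_of_mem (L : List String) (o : String) (h : o ∈ L) : pKey o ∈ ctgs L := by
  have : pKey o ∈ L.map pKey := List.mem_map.2 ⟨o, h, rfl⟩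
  exact (PySem.Set.mem_ofList _ _).2 this

theorem B_state (L : List String) :
    L.foldl (fun st orf =>
      let p := indexFromName orf
      let r := st.1.getD p.1 (st.1.size : Int)
      (st.1.setdefault p.1 (st.1.size : Int), st.2 ++ [(r, p.2, orf)]))
      ((PySem.Dict.empty : PySem.Dict String Int), ([] : List (Int × Int × String))) =
      (PySem.Dict.mk (rankItems (ctgs L)), L.map (trip L)) := by
  induction L using List.reverseRecOn with
  | nil => rfl
  | append_singleton L x ih =>
    rw [List.foldl_append, ih, List.foldl_cons, List.foldl_nil]
    have hsize : (PySem.Dict.mk (rankItems (ctgs L))).size = (ctgs L).length := by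
      simp [PySem.Dict.size, rankItems]
    have hget? : ∀ c', (PySem.Dict.mk (rankItems (ctgs L))).get? c' =
        if c' ∈ ctgs L then some (((ctgs L).idxOf c' : Nat) : Int) else none := by
      intro c'
      show Option.map (fun x => x.2) (List.find? (fun p => p.1 == c') (rankItems (ctgs L))) = _
      rw [show rankItems (ctgs L) = ((ctgs L).zipIdx 0).map (fun p => (p.1, (p.2 : Int)))
          from rfl,
        find?_rankItems]
      by_cases h : c' ∈ ctgs L
      · rw [if_pos h, if_pos h]
        simp
      · rw [if_neg h, if_neg h]
        rfl
    have hcont : ∀ c', (PySem.Dict.mk (rankItems (ctgs L))).contains c' = decide (c' ∈ ctgs L) := by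
      intro c'
      by_cases h : c' ∈ ctgs L
      · simp only [h, decide_true]
        by_contra hcc
        have hfalse : (PySem.Dict.mk (rankItems (ctgs L))).contains c' = false := by
          cases hx : (PySem.Dict.mk (rankItems (ctgs L))).contains c'
          · rfl
          · exact absurd hx hcc
        have h2 := (PySem.Dict.get?_eq_none_iff_contains _ _).2 hfalse
        rw [hget? c', if_pos h] at h2
        simp at h2
      · simp only [h, decide_false]
        exact (PySem.Dict.get?_eq_none_iff_contains _ _).1 (by rw [hget? c', if_neg h])
    show ((PySem.Dict.mk (rankItems (ctgs L))).setdefault (pKey x)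
        (((PySem.Dict.mk (rankItems (ctgs L))).size : Int)),
      L.map (trip L) ++ [((PySem.Dict.mk (rankItems (ctgs L))).getD (pKey x)
        (((PySem.Dict.mk (rankItems (ctgs L))).size : Int)), pIdx x, x)]) = _
    by_cases hc : pKey x ∈ ctgs L
    · have hct : ctgs (L ++ [x]) = ctgs L := by
        have h1 : ctgs (L ++ [x]) = PySem.Set.add (ctgs L) (pKey x) := by
          show PySem.List.dedup _ = _
          rw [List.map_append, List.map_singleton]
          exact PySem.Set.ofList_append_singleton _ _
        rw [h1, PySem.Set.add_of_mem hc]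
      have htrip : ∀ o, trip (L ++ [x]) o = trip L o := by
        intro o
        show (rnk (L ++ [x]) (pKey o), pIdx o, o) = (rnk L (pKey o), pIdx o, o)
        rw [rnk, rnk, hct]
      have hr : (PySem.Dict.mk (rankItems (ctgs L))).getD (pKey x)
          (((PySem.Dict.mk (rankItems (ctgs L))).size : Int)) = rnk L (pKey x) := by
        rw [PySem.Dict.getD, hget?, if_pos hc]
        rfl
      rw [PySem.Dict.setdefault_of_contains _ _ (by rw [hcont]; simp [hc]), hct,
        List.map_append, List.map_congr_left (fun o _ => htrip o), List.map_singleton, htrip x,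
        hr]
      show _ = (_, L.map (trip L) ++ [(rnk L (pKey x), pIdx x, x)])
      rfl
    · have hct : ctgs (L ++ [x]) = ctgs L ++ [pKey x] := by
        have h1 : ctgs (L ++ [x]) = PySem.Set.add (ctgs L) (pKey x) := by
          show PySem.List.dedup _ = _
          rw [List.map_append, List.map_singleton]
          exact PySem.Set.ofList_append_singleton _ _
        rw [h1, PySem.Set.add_of_not_mem hc]
      have hcontf : (PySem.Dict.mk (rankItems (ctgs L))).contains (pKey x) = false := by
        rw [hcont]; simp [hc]
      have hsd : (PySem.Dict.mk (rankItems (ctgs L))).setdefault (pKey x)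
          (((PySem.Dict.mk (rankItems (ctgs L))).size : Int)) =
          PySem.Dict.mk (rankItems (ctgs (L ++ [x]))) := by
        rw [PySem.Dict.setdefault, if_neg (by rw [hcontf]; simp), hsize, hct]
        congr 1
        conv_rhs => rw [rankItems, List.zipIdx_append, List.map_append]
        congr 1
        simp
      have hr : ((PySem.Dict.mk (rankItems (ctgs L))).getD (pKey x)
          (((PySem.Dict.mk (rankItems (ctgs L))).size : Int))) = (((ctgs L).length : Nat) : Int) := by
        rw [PySem.Dict.getD, hget?, if_neg hc, hsize]
        rfl
      rw [hsd, hr, List.map_append, List.map_singleton]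
      congr 2
      · exact List.map_congr_left (fun o ho => by
          show (rnk L (pKey o), pIdx o, o) = (rnk (L ++ [x]) (pKey o), pIdx o, o)
          rw [rnk, rnk, hct, List.idxOf_append, if_pos (mem_ctgs_of_mem L o ho)])
      · have hx2 : ((((ctgs L).length : Nat) : Int), pIdx x, x) = trip (L ++ [x]) x := by
          show _ = (rnk (L ++ [x]) (pKey x), pIdx x, x)
          rw [rnk, hct, List.idxOf_append, if_neg hc, List.idxOf_cons_self]
          simp
        rw [hx2]

-- segment bookkeeping
theorem flatMap_getD (D : List String) (F : String → List (List String)) :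
    D.flatMap F = (List.range D.length).flatMap (fun j => F (D.getD j "")) := by
  induction D with
  | nil => rfl
  | cons a D' ih =>
    rw [List.flatMap_cons, List.length_cons, List.range_succ_eq_map, List.flatMap_cons,
      List.flatMap_map, ih]
    rfl

-- main equivalence
theorem main_eq (L : List String) (mg : Int) :
    cluster_by_index L mg = cluster_by_index_alt L mg := by
  have halt : cluster_by_index_alt L mg =
      scanB mg (PySem.List.sorted2 (L.map (trip L)) (fun t => t.1) (fun t => t.2.1) false) := by
    show scanB mg (PySem.List.sorted2 (L.foldl (fun st orf =>
        let p := indexFromName orf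
        let r := st.1.getD p.1 (st.1.size : Int)
        (st.1.setdefault p.1 (st.1.size : Int), st.2 ++ [(r, p.2, orf)]))
        ((PySem.Dict.empty : PySem.Dict String Int), ([] : List (Int × Int × String)))).2
        (fun t => t.1) (fun t => t.2.1) false) = _
    rw [B_state]
  rw [halt]
  have hnd : (ctgs L).Nodup := PySem.Set.nodup_ofList _
  have hks : ((List.range (ctgs L).length).map (fun j : Nat => (j : Int))).Pairwise (· < ·) := by
    refine List.Pairwise.map (fun j : Nat => (j : Int)) (fun a b hab => ?_) List.pairwise_lt_range
    exact Int.ofNat_lt.2 hab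
  have hcov : ∀ y ∈ L.map (trip L), y.1 ∈ (List.range (ctgs L).length).map (fun j : Nat => (j : Int)) := by
    intro y hy
    obtain ⟨o, ho, rfl⟩ := List.mem_map.1 hy
    have h2 : (ctgs L).idxOf (pKey o) < (ctgs L).length :=
      List.idxOf_lt_length_of_mem (mem_ctgs_of_mem L o ho)
    exact List.mem_map.2 ⟨_, List.mem_range.2 h2, rfl⟩
  rw [sorted2_flatMap _ _ hks hcov]
  have hFG : ∀ k ∈ (List.range (ctgs L).length).map (fun j : Nat => (j : Int)),
      PySem.List.sorted ((L.map (trip L)).filter (fun x => x.1 == k)) (fun x => x.2.1) false =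
      (PySem.List.sorted (bkt L ((ctgs L).getD k.toNat "")) (fun e => e.1) false).map
        (fun e => (k, e.1, e.2)) := by
    intro k hk
    obtain ⟨j, hj, rfl⟩ := List.mem_map.1 hk
    rw [List.mem_range] at hj
    rw [Int.toNat_natCast]
    have hc : (ctgs L).getD j "" = (ctgs L)[j] := List.getD_eq_getElem _ _ hj
    have hfil : (L.map (trip L)).filter (fun x => x.1 == ((j : Nat) : Int)) =
        (L.filter (fun o => pKey o == (ctgs L).getD j "")).map (trip L) := by
      rw [List.filter_map]
      congr 1
      refine List.filter_congr (fun o ho => ?_)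
      show (rnk L (pKey o) == ((j : Nat) : Int)) = (pKey o == (ctgs L).getD j "")
      have hmem : pKey o ∈ ctgs L := mem_ctgs_of_mem L o ho
      have hcm : (ctgs L).getD j "" ∈ ctgs L := by rw [hc]; exact List.getElem_mem hj
      have h6 : (ctgs L).idxOf ((ctgs L).getD j "") = j := by
        rw [hc]; exact List.Nodup.idxOf_getElem hnd j hj
      by_cases h : pKey o = (ctgs L).getD j ""
      · have h7 : rnk L (pKey o) = ((j : Nat) : Int) := by rw [rnk, h, h6]
        rw [Bool.eq_iff_iff]; simp only [beq_iff_eq]; exact iff_of_true h7 h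
      · have h7 : rnk L (pKey o) ≠ ((j : Nat) : Int) := by
          intro heq
          refine h ((List.idxOf_inj hmem).1 ?_)
          rw [h6]
          have h8 := heq
          rw [rnk] at h8
          exact_mod_cast h8
        rw [Bool.eq_iff_iff]; simp only [beq_iff_eq]; exact iff_of_false h7 h
    rw [hfil,
      List.map_congr_left (f := trip L)
        (g := (fun e => (((j : Nat) : Int), e.1, e.2)) ∘ (fun o => (pIdx o, o)))
        (fun o ho => by
          have h1 : pKey o = (ctgs L).getD j "" := by simpa using (List.mem_filter.1 ho).2
          show (rnk L (pKey o), pIdx o, o) = (((j : Nat) : Int), pIdx o, o)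
          rw [h1, rnk, hc, List.Nodup.idxOf_getElem hnd j hj]),
      ← List.map_map, sorted_map]
    rfl
  rw [flatMap_congr_mem _ _ _ hFG]
  have hbne : ∀ j, j < (ctgs L).length → bkt L ((ctgs L).getD j "") ≠ [] := by
    intro j hj
    have hc : (ctgs L).getD j "" = (ctgs L)[j] := List.getD_eq_getElem _ _ hj
    have hmem : (ctgs L).getD j "" ∈ ctgs L := by rw [hc]; exact List.getElem_mem hj
    have hmem2 : (ctgs L).getD j "" ∈ L.map pKey := (PySem.Set.mem_ofList _ _).1 hmem
    obtain ⟨o, ho, hko⟩ := List.mem_map.1 hmem2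
    have : o ∈ L.filter (fun o => pKey o == (ctgs L).getD j "") :=
      List.mem_filter.2 ⟨ho, by simp [hko]⟩
    intro hbad
    rw [bkt, List.map_eq_nil_iff] at hbad
    rw [hbad] at this
    exact List.not_mem_nil this
  rw [scanB_flatMap mg _ _
    (by
      intro k hk
      obtain ⟨j, hj, rfl⟩ := List.mem_map.1 hk
      rw [List.mem_range] at hj
      rw [Int.toNat_natCast]
      intro hbad
      rw [List.map_eq_nil_iff, PySem.List.sorted_eq_nil_iff] at hbad
      exact hbne j hj hbad)
    (by
      intro k hk e he
      obtain ⟨e0, _, rfl⟩ := List.mem_map.1 he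
      rfl)
    (hks.imp ne_of_lt)]
  have hseg : ∀ k ∈ (List.range (ctgs L).length).map (fun j : Nat => (j : Int)),
      scanB mg ((PySem.List.sorted (bkt L ((ctgs L).getD k.toNat "")) (fun e => e.1) false).map
        (fun e => (k, e.1, e.2))) = scanBkt mg (bkt L ((ctgs L).getD k.toNat "")) := by
    intro k hk
    obtain ⟨j, hj, rfl⟩ := List.mem_map.1 hk
    rw [List.mem_range] at hj
    rw [Int.toNat_natCast] at *
    cases hs : PySem.List.sorted (bkt L ((ctgs L).getD j "")) (fun e => e.1) false with
    | nil => exact absurd ((PySem.List.sorted_eq_nil_iff _ _ _).1 hs) (hbne j hj)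
    | cons e0 rest =>
      rw [scanB_seg]
      simp only [scanBkt]
      rw [hs]
  rw [flatMap_congr_mem _ _ _ hseg, List.flatMap_map,
    flatMap_congr_mem (List.range (ctgs L).length)
      (fun a => scanBkt mg (bkt L ((ctgs L).getD ((a : Nat) : Int).toNat "")))
      (fun j => scanBkt mg (bkt L ((ctgs L).getD j "")))
      (fun a _ => by simp [Int.toNat_natCast]),
    ← flatMap_getD (ctgs L) (fun c => scanBkt mg (bkt L c)), ← A_norm]


-- ===== VERDICT (by name: the statement is the Claim_ definition above) =====
theorem cluster_by_index_spec : Claim_equal_cluster_by_index := by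
  intro L mg _; exact main_eq L mg
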